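-- pv_equiv track=rewrite | github.com/luningcowboy/tuyoo | dizhu/src/dizhu/games/endgame/engine/utils.py | translate_human_card_to_tycard
-- ===== SOURCE A (Python) =====
-- s2v = {
--     '3': 0, '4': 1, '5': 2, '6': 3,
--     '7': 4, '8': 5, '9': 6, '10': 7,
--     'J': 8, 'j': 8,
--     'Q': 9, 'q': 9,
--     'K': 10, 'k': 10,
--     'A': 11, 'a': 11,
--     '2': 12,
--     'Y': 13, 'y': 13, 'joker': 13,
--     'Z': 14, 'z': 14, 'JOKER': 14
--
-- }
--
-- cardToPoint = [11, 12, 0, 1, 2, 3, 4, 5, 6, 7, 8, 9, 10,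
--                11, 12, 0, 1, 2, 3, 4, 5, 6, 7, 8, 9, 10,
--                11, 12, 0, 1, 2, 3, 4, 5, 6, 7, 8, 9, 10,
--                11, 12, 0, 1, 2, 3, 4, 5, 6, 7, 8, 9, 10,
--                13, 14]
--
-- def translate_human_card_to_tycard(nongmin_cards, dizhu_cards):
--     total_cards = list(reversed(range(54)))
--     if isinstance(nongmin_cards, list) and isinstance(dizhu_cards, list):
--         return nongmin_cards, dizhu_cards
--
--     nongmin_cards = nongmin_cards.split()
--     points_nongmin = [s2v[v] for v in nongmin_cards]
--     dizhu_cards = dizhu_cards.split()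
--     points_dizhu = [s2v[v] for v in dizhu_cards]
--
--     dizhu_out = []
--     for point in points_dizhu:
--         for card in total_cards:
--             if cardToPoint[card] == point:
--                 dizhu_out.append(card)
--                 total_cards.remove(card)
--                 break
--
--     nongmin_out = []
--     for point in points_nongmin:
--         for card in total_cards:
--             if cardToPoint[card] == point:
--                 nongmin_out.append(card)
--                 total_cards.remove(card)
--                 break
--
--     return nongmin_out, dizhu_out
-- ===== SOURCE B (Python) =====
-- s2v = {
--     '3': 0, '4': 1, '5': 2, '6': 3,
--     '7': 4, '8': 5, '9': 6, '10': 7,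
--     'J': 8, 'j': 8,
--     'Q': 9, 'q': 9,
--     'K': 10, 'k': 10,
--     'A': 11, 'a': 11,
--     '2': 12,
--     'Y': 13, 'y': 13, 'joker': 13,
--     'Z': 14, 'z': 14, 'JOKER': 14
--
-- }
--
-- cardToPoint = [11, 12, 0, 1, 2, 3, 4, 5, 6, 7, 8, 9, 10,
--                11, 12, 0, 1, 2, 3, 4, 5, 6, 7, 8, 9, 10,
--                11, 12, 0, 1, 2, 3, 4, 5, 6, 7, 8, 9, 10,
--                11, 12, 0, 1, 2, 3, 4, 5, 6, 7, 8, 9, 10,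
--                13, 14]
--
--
-- def translate_human_card_to_tycard(nongmin_cards, dizhu_cards):
--     if isinstance(nongmin_cards, list) and isinstance(dizhu_cards, list):
--         return nongmin_cards, dizhu_cards
--
--     points_nongmin = [s2v[v] for v in nongmin_cards.split()]
--     points_dizhu = [s2v[v] for v in dizhu_cards.split()]
--
--     # bucket the 54 card ids by point, each bucket in descending card order
--     buckets = {}
--     for card in reversed(range(54)):
--         buckets.setdefault(cardToPoint[card], []).append(card)
--
--     dizhu_out = []
--     for point in points_dizhu:
--         b = buckets.get(point)
--         if b:
--             dizhu_out.append(b.pop(0))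
--
--     nongmin_out = []
--     for point in points_nongmin:
--         b = buckets.get(point)
--         if b:
--             nongmin_out.append(b.pop(0))
--
--     return nongmin_out, dizhu_out
-- ===== Notes on version B (the rewrite author's own statement) =====
-- stated objective: alternative
-- what changed: Instead of rescanning the shrinking 54-card list for each requested point, B buckets the 54 card ids by point once (each bucket in descending card order) and serves every request by popping the head of its bucket, skipping empty buckets.
import Mathlib
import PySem

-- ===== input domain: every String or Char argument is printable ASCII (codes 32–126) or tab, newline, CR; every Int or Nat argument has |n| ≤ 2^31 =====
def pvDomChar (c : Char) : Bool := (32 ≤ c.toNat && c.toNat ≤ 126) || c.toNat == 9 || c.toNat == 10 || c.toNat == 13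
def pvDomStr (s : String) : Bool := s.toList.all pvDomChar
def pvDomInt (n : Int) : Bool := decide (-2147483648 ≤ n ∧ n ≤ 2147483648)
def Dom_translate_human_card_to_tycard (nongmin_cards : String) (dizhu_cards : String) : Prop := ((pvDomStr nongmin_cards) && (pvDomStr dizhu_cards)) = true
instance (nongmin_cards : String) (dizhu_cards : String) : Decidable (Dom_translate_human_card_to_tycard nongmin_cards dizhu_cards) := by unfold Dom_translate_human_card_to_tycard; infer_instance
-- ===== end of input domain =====

-- B replaces A's inner scan over the shrinking 54-card list by per-point buckets built
-- once, served by popping the head (objective: alternative, removes the inner scan).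
-- Both arguments are Strings here, so Python's isinstance-list early return never fires.

-- shared module-level constants (same module in the Python source)
def pvS2v : PySem.Dict String Int := PySem.Dict.ofList
  [("3", 0), ("4", 1), ("5", 2), ("6", 3), ("7", 4), ("8", 5), ("9", 6), ("10", 7),
   ("J", 8), ("j", 8), ("Q", 9), ("q", 9), ("K", 10), ("k", 10), ("A", 11), ("a", 11),
   ("2", 12), ("Y", 13), ("y", 13), ("joker", 13), ("Z", 14), ("z", 14), ("JOKER", 14)]

def pvCardToPoint : List Int :=
  [11, 12, 0, 1, 2, 3, 4, 5, 6, 7, 8, 9, 10,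
   11, 12, 0, 1, 2, 3, 4, 5, 6, 7, 8, 9, 10,
   11, 12, 0, 1, 2, 3, 4, 5, 6, 7, 8, 9, 10,
   11, 12, 0, 1, 2, 3, 4, 5, 6, 7, 8, 9, 10,
   13, 14]

-- cardToPoint[card]; the index is always one of 0..53, so the default is never used
def pvCp (card : Int) : Int := PySem.List.pyGetD pvCardToPoint card 0

-- s2v[v]; a missing key is a KeyError, excluded by Pre_, so the default is never used
def pvLookup (v : String) : Int := (PySem.Dict.get? pvS2v v).getD 0

-- ===== PORT A =====
-- the inner 'for card in total_cards: if …: break' — first card with the given point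
def pvScanA (total : List Int) (point : Int) : Option Int :=
  match total with
  | [] => none
  | c :: rest => if pvCp c == point then some c else pvScanA rest point

-- one of A's outer loops: state (out, total_cards); found card appended and removed
def pvServeA (points : List Int) (init : List Int × List Int) : List Int × List Int :=
  points.foldl (fun st p =>
    match pvScanA st.2 p with
    | some c => (st.1 ++ [c], (PySem.List.remove? st.2 c).getD st.2)
    | none => st) init

def translate_human_card_to_tycard (nongmin_cards : String) (dizhu_cards : String) :
    List Int × List Int :=
  let total_cards := (PySem.List.pyRange 0 54 1).reverse
  let points_nongmin := (PySem.Str.split₀ nongmin_cards).map pvLookup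
  let points_dizhu := (PySem.Str.split₀ dizhu_cards).map pvLookup
  let r1 := pvServeA points_dizhu ([], total_cards)
  let r2 := pvServeA points_nongmin ([], r1.2)
  (r2.1, r1.1)

-- ===== PORT B =====
-- buckets.setdefault(cardToPoint[card], []).append(card) over reversed(range(54))
def pvBuckets : PySem.Dict Int (List Int) :=
  ((PySem.List.pyRange 0 54 1).reverse).foldl
    (fun d c => d.modify (pvCp c) [] (· ++ [c])) PySem.Dict.empty

-- one of B's serving loops: pop the bucket's head if the bucket is non-empty
def pvServeB (points : List Int) (init : List Int × PySem.Dict Int (List Int)) :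
    List Int × PySem.Dict Int (List Int) :=
  points.foldl (fun st p =>
    match st.2.getD p [] with
    | [] => st
    | c :: rest => (st.1 ++ [c], st.2.insert p rest)) init

def translate_human_card_to_tycard_alt (nongmin_cards : String) (dizhu_cards : String) :
    List Int × List Int :=
  let points_nongmin := (PySem.Str.split₀ nongmin_cards).map pvLookup
  let points_dizhu := (PySem.Str.split₀ dizhu_cards).map pvLookup
  let r1 := pvServeB points_dizhu ([], pvBuckets)
  let r2 := pvServeB points_nongmin ([], r1.2)
  (r2.1, r1.1)

-- ===== PRECONDITION & SPEC =====
-- Pre_ excludes exactly the inputs where some whitespace-separated token is not a key of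
-- s2v: Python's s2v[v] raises KeyError there (in A and in B alike).
def Pre_translate_human_card_to_tycard (nongmin_cards : String) (dizhu_cards : String) : Prop :=
  (((PySem.Str.split₀ nongmin_cards).all (fun v => (PySem.Dict.get? pvS2v v).isSome)) &&
   ((PySem.Str.split₀ dizhu_cards).all (fun v => (PySem.Dict.get? pvS2v v).isSome))) = true

instance (nongmin_cards : String) (dizhu_cards : String) :
    Decidable (Pre_translate_human_card_to_tycard nongmin_cards dizhu_cards) := by
  unfold Pre_translate_human_card_to_tycard; infer_instance

def pvWitness_translate_human_card_to_tycard : String × String := ("3 3 joker K", "JOKER 2 k 10")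

def Spec_translate_human_card_to_tycard (nongmin_cards : String) (dizhu_cards : String)
    (out : List Int × List Int) : Prop :=
  out = translate_human_card_to_tycard_alt nongmin_cards dizhu_cards

instance (nongmin_cards : String) (dizhu_cards : String) (out : List Int × List Int) :
    Decidable (Spec_translate_human_card_to_tycard nongmin_cards dizhu_cards out) := by
  unfold Spec_translate_human_card_to_tycard; infer_instance

-- ===== CLAIM (what is proved, stated in full; the proofs are below) =====
def Claim_equal_translate_human_card_to_tycard : Prop :=
  ∀ (nongmin_cards : String) (dizhu_cards : String),
    Dom_translate_human_card_to_tycard nongmin_cards dizhu_cards →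
    Pre_translate_human_card_to_tycard nongmin_cards dizhu_cards →
    Spec_translate_human_card_to_tycard nongmin_cards dizhu_cards
      (translate_human_card_to_tycard nongmin_cards dizhu_cards)

-- ===== LEMMAS AND PROOFS =====

-- invariant tying A's remaining card list to B's buckets
def pvInv (total : List Int) (d : PySem.Dict Int (List Int)) : Prop :=
  ∀ p : Int, d.getD p [] = total.filter (fun c => pvCp c == p)

theorem pvBuild_getD (l : List Int) (d : PySem.Dict Int (List Int)) (p : Int) :
    (l.foldl (fun d c => d.modify (pvCp c) [] (· ++ [c])) d).getD p [] =
      d.getD p [] ++ l.filter (fun c => pvCp c == p) := by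
  induction l generalizing d with
  | nil => simp
  | cons c l ih =>
    simp only [List.foldl_cons, List.filter_cons, ih]
    rw [PySem.Dict.getD_modify]
    by_cases h : p = pvCp c
    · have hb : (pvCp c == p) = true := by rw [h]; exact beq_self_eq_true _
      rw [if_pos h, hb, h, List.append_assoc]
      simp
    · have hb : (pvCp c == p) = false := beq_eq_false_iff_ne.mpr (fun hh => h hh.symm)
      rw [if_neg h, hb]
      simp

theorem pvInv_init : pvInv ((PySem.List.pyRange 0 54 1).reverse) pvBuckets := by
  intro p
  unfold pvBuckets
  rw [pvBuild_getD]
  simp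

theorem pvScanA_eq_head_filter (total : List Int) (p : Int) :
    pvScanA total p = (total.filter (fun c => pvCp c == p)).head? := by
  induction total with
  | nil => rfl
  | cons c rest ih =>
    simp only [pvScanA, List.filter_cons]
    by_cases h : (pvCp c == p) = true
    · simp [h]
    · simp only [Bool.not_eq_true] at h
      simp [h, ih]

theorem pvFilter_erase_neg {pred : Int → Bool} (l : List Int) (a : Int)
    (h : pred a = false) : (l.erase a).filter pred = l.filter pred := by
  induction l with
  | nil => rfl
  | cons x xs ih =>
    by_cases hx : x = a
    · subst hx
      simp [List.erase_cons_head, h]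
    · rw [List.erase_cons_tail (by simpa using hx)]
      simp only [List.filter_cons, ih]

theorem pvFilter_erase_pos {pred : Int → Bool} (l : List Int) (a : Int)
    (h : pred a = true) : (l.erase a).filter pred = (l.filter pred).erase a := by
  induction l with
  | nil => rfl
  | cons x xs ih =>
    by_cases hx : x = a
    · subst hx
      simp [List.erase_cons_head, h]
    · rw [List.erase_cons_tail (by simpa using hx)]
      by_cases hp : pred x = true
      · simp only [List.filter_cons, hp, if_true, ih]
        rw [List.erase_cons_tail (by simpa using hx)]
      · simp only [Bool.not_eq_true] at hp
        simp [hp, ih]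

theorem pvServe_eq (points : List Int) :
    ∀ (out total : List Int) (d : PySem.Dict Int (List Int)), pvInv total d →
      (pvServeA points (out, total)).1 = (pvServeB points (out, d)).1 ∧
      pvInv (pvServeA points (out, total)).2 (pvServeB points (out, d)).2 := by
  induction points with
  | nil => intro out total d h; exact ⟨rfl, h⟩
  | cons p ps ih =>
    intro out total d hInv
    simp only [pvServeA, pvServeB, List.foldl_cons]
    rcases hfil : total.filter (fun c => pvCp c == p) with _ | ⟨c, rest⟩
    · have hA : pvScanA total p = none := by rw [pvScanA_eq_head_filter, hfil]; rfl
      have hB : d.getD p [] = [] := by rw [hInv p, hfil]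
      simp only [hA, hB]
      exact ih out total d hInv
    · have hA : pvScanA total p = some c := by rw [pvScanA_eq_head_filter, hfil]; rfl
      have hB : d.getD p [] = c :: rest := by rw [hInv p, hfil]
      have hc_mem_filter : c ∈ total.filter (fun c => pvCp c == p) := by
        rw [hfil]; exact List.mem_cons_self
      have hcp : (pvCp c == p) = true := (List.mem_filter.mp hc_mem_filter).2
      have hc_mem : c ∈ total := (List.mem_filter.mp hc_mem_filter).1
      have hrem : (PySem.List.remove? total c).getD total = total.erase c := by
        rw [PySem.List.remove?_eq_some_erase total c hc_mem]; rfl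
      simp only [hA, hB, hrem]
      apply ih
      intro q
      rw [PySem.Dict.getD_insert]
      by_cases hq : q = p
      · subst hq
        rw [pvFilter_erase_pos total c hcp, hfil, List.erase_cons_head]
        simp
      · have hne : (pvCp c == q) = false := by
          have : pvCp c = p := by simpa using hcp
          rw [this]
          exact beq_eq_false_iff_ne.mpr (fun hh => hq hh.symm)
        rw [pvFilter_erase_neg total c hne, hInv q]
        simp [hq]

-- ===== VERDICT (by name: the statement is the Claim_ definition above) =====
theorem translate_human_card_to_tycard_spec : Claim_equal_translate_human_card_to_tycard := by
  intro nongmin_cards dizhu_cards _ _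
  unfold Spec_translate_human_card_to_tycard
  unfold translate_human_card_to_tycard translate_human_card_to_tycard_alt
  have h1 := pvServe_eq ((PySem.Str.split₀ dizhu_cards).map pvLookup) []
    ((PySem.List.pyRange 0 54 1).reverse) pvBuckets pvInv_init
  have h2 := pvServe_eq ((PySem.Str.split₀ nongmin_cards).map pvLookup) []
    (pvServeA ((PySem.Str.split₀ dizhu_cards).map pvLookup)
      ([], (PySem.List.pyRange 0 54 1).reverse)).2
    (pvServeB ((PySem.Str.split₀ dizhu_cards).map pvLookup) ([], pvBuckets)).2 h1.2
  exact Prod.ext h2.1 h1.1
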